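-- pv_equiv track=rewrite | github.com/masoodraza9760/ugc_net_score_analyzer | net_marks_calculator_using_pdf.py | calculate_marks
-- ===== SOURCE A (Python) =====
-- def calculate_marks(response_dict, answer_key_dict, marks_per_correct=2, marks_per_wrong=0):
--     correct = incorrect = dropped = unattempted = 0
--
--     for qid, correct_opt in answer_key_dict.items():
--         chosen_opt = response_dict.get(qid)
--
--         if correct_opt == 'D':
--             dropped += 1
--         elif chosen_opt is None:
--             unattempted += 1
--         elif chosen_opt == correct_opt:
--             correct += 1
--         else:
--             incorrect += 1
--
--     score = correct * marks_per_correct + incorrect * marks_per_wrong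
--
--     return {
--         "Total Questions": len(answer_key_dict),
--         "Attempted": correct + incorrect,
--         "Correct": correct,
--         "Incorrect": incorrect,
--         "Unattempted": unattempted,
--         "Dropped": dropped,
--         "Final Score": score
--     }
-- ===== SOURCE B (Python) =====
-- def calculate_marks(response_dict, answer_key_dict, marks_per_correct=2, marks_per_wrong=0):
--     dropped = sum(1 for v in answer_key_dict.values() if v == 'D')
--     live = [(q, v) for q, v in answer_key_dict.items() if v != 'D']
--     unattempted = sum(1 for q, _v in live if response_dict.get(q) is None)
--     correct = sum(1 for q, v in live if response_dict.get(q) == v)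
--     incorrect = sum(1 for q, v in live
--                     if response_dict.get(q) is not None and response_dict.get(q) != v)
--     return {
--         "Total Questions": len(answer_key_dict),
--         "Attempted": correct + incorrect,
--         "Correct": correct,
--         "Incorrect": incorrect,
--         "Unattempted": unattempted,
--         "Dropped": dropped,
--         "Final Score": correct * marks_per_correct + incorrect * marks_per_wrong,
--     }
-- ===== Notes on version B (the rewrite author's own statement) =====
-- stated objective: alternative
-- what changed: Replaces A's single branching accumulator loop with separate filtered category counts (dropped over all entries; unattempted/correct/incorrect over the non-'D' entries), assembled into the same result dict.
import Mathlib
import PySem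

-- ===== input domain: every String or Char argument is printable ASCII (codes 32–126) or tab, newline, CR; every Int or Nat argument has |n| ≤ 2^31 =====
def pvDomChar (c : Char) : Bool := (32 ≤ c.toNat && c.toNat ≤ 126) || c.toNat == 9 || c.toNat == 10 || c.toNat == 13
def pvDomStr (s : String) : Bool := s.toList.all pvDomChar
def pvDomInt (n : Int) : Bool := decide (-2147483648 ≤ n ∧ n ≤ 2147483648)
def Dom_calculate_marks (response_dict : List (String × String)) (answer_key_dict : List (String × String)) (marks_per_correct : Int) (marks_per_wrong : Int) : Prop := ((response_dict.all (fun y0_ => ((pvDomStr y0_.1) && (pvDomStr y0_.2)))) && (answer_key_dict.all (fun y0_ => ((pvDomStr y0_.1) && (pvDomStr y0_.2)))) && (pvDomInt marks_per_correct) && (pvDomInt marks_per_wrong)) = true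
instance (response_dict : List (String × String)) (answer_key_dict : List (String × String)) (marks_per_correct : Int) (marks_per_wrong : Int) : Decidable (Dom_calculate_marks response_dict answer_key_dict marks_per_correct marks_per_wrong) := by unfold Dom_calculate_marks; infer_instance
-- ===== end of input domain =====

-- B replaces A's single branching accumulator loop by separate filtered category
-- counts over the answer key (objective: alternative decomposition, same cost).

-- dict.get(k): first match in the association list (exact for Python dicts, whose keys are unique)
def pvGet (d : List (String × String)) (k : String) : Option String :=
  (d.find? (fun p => p.1 == k)).map (·.2)

-- ===== PORT A =====
def calculate_marks (response_dict : List (String × String)) (answer_key_dict : List (String × String)) (marks_per_correct : Int) (marks_per_wrong : Int) : List (String × Int) :=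
  let st : Int × Int × Int × Int := answer_key_dict.foldl
    (fun (st : Int × Int × Int × Int) qv =>
      let chosen := pvGet response_dict qv.1
      if qv.2 = "D" then (st.1, st.2.1, st.2.2.1 + 1, st.2.2.2)
      else if chosen = none then (st.1, st.2.1, st.2.2.1, st.2.2.2 + 1)
      else if chosen = some qv.2 then (st.1 + 1, st.2.1, st.2.2.1, st.2.2.2)
      else (st.1, st.2.1 + 1, st.2.2.1, st.2.2.2)) (0, 0, 0, 0)
  let correct := st.1
  let incorrect := st.2.1
  let dropped := st.2.2.1
  let unattempted := st.2.2.2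
  let score := correct * marks_per_correct + incorrect * marks_per_wrong
  [("Total Questions", (answer_key_dict.length : Int)),
   ("Attempted", correct + incorrect),
   ("Correct", correct),
   ("Incorrect", incorrect),
   ("Unattempted", unattempted),
   ("Dropped", dropped),
   ("Final Score", score)]

-- ===== PORT B =====
def calculate_marks_alt (response_dict : List (String × String)) (answer_key_dict : List (String × String)) (marks_per_correct : Int) (marks_per_wrong : Int) : List (String × Int) :=
  let dropped : Int := (answer_key_dict.countP (fun qv => qv.2 == "D") : Nat)
  let live := answer_key_dict.filter (fun qv => qv.2 != "D")
  let unattempted : Int := (live.countP (fun qv => pvGet response_dict qv.1 == none) : Nat)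
  let correct : Int := (live.countP (fun qv => pvGet response_dict qv.1 == some qv.2) : Nat)
  let incorrect : Int := (live.countP
    (fun qv => (pvGet response_dict qv.1).isSome && pvGet response_dict qv.1 != some qv.2) : Nat)
  [("Total Questions", (answer_key_dict.length : Int)),
   ("Attempted", correct + incorrect),
   ("Correct", correct),
   ("Incorrect", incorrect),
   ("Unattempted", unattempted),
   ("Dropped", dropped),
   ("Final Score", correct * marks_per_correct + incorrect * marks_per_wrong)]

-- ===== PRECONDITION & SPEC =====
def Spec_calculate_marks (response_dict : List (String × String)) (answer_key_dict : List (String × String)) (marks_per_correct : Int) (marks_per_wrong : Int) (out : List (String × Int)) : Prop := out = calculate_marks_alt response_dict answer_key_dict marks_per_correct marks_per_wrong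
instance (response_dict : List (String × String)) (answer_key_dict : List (String × String)) (marks_per_correct : Int) (marks_per_wrong : Int) (out : List (String × Int)) : Decidable (Spec_calculate_marks response_dict answer_key_dict marks_per_correct marks_per_wrong out) := by unfold Spec_calculate_marks; infer_instance

-- ===== CLAIM (what is proved, stated in full; the proofs are below) =====
def Claim_equal_calculate_marks : Prop := ∀ (response_dict : List (String × String)) (answer_key_dict : List (String × String)) (marks_per_correct : Int) (marks_per_wrong : Int), Dom_calculate_marks response_dict answer_key_dict marks_per_correct marks_per_wrong → Spec_calculate_marks response_dict answer_key_dict marks_per_correct marks_per_wrong (calculate_marks response_dict answer_key_dict marks_per_correct marks_per_wrong)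

-- ===== LEMMAS AND PROOFS =====

-- the loop of A computes exactly B's four category counts
lemma calculate_marks_loop (rd : List (String × String)) :
    ∀ (akd : List (String × String)) (c i d u : Int),
    akd.foldl
      (fun (st : Int × Int × Int × Int) qv =>
        let chosen := pvGet rd qv.1
        if qv.2 = "D" then (st.1, st.2.1, st.2.2.1 + 1, st.2.2.2)
        else if chosen = none then (st.1, st.2.1, st.2.2.1, st.2.2.2 + 1)
        else if chosen = some qv.2 then (st.1 + 1, st.2.1, st.2.2.1, st.2.2.2)
        else (st.1, st.2.1 + 1, st.2.2.1, st.2.2.2)) (c, i, d, u)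
    = (c + ((akd.filter (fun qv => qv.2 != "D")).countP
              (fun qv => pvGet rd qv.1 == some qv.2) : Nat),
       i + ((akd.filter (fun qv => qv.2 != "D")).countP
              (fun qv => (pvGet rd qv.1).isSome && pvGet rd qv.1 != some qv.2) : Nat),
       d + (akd.countP (fun qv => qv.2 == "D") : Nat),
       u + ((akd.filter (fun qv => qv.2 != "D")).countP
              (fun qv => pvGet rd qv.1 == none) : Nat)) := by
  intro akd
  induction akd with
  | nil => intro c i d u; simp
  | cons qv rest ih =>
    intro c i d u
    simp only [List.foldl_cons, List.filter_cons, List.countP_cons]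
    by_cases hD : qv.2 = "D"
    · simp [hD, ih]
      omega
    · have hD' : (qv.2 != "D") = true := by simp [hD]
      by_cases hN : pvGet rd qv.1 = none
      · simp [hD, hD', hN, ih]
        omega
      · obtain ⟨v, hv⟩ := Option.ne_none_iff_exists'.mp hN
        by_cases hC : pvGet rd qv.1 = some qv.2
        · simp [hD, hD', hC, ih]
          omega
        · have hvne : v ≠ qv.2 := fun h => hC (h ▸ hv)
          simp [hD, hD', hv, hvne, ih]
          omega

-- ===== VERDICT (by name: the statement is the Claim_ definition above) =====
theorem calculate_marks_spec : Claim_equal_calculate_marks := by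
  intro rd akd mc mw _
  show _ = _
  unfold calculate_marks calculate_marks_alt
  simp only [calculate_marks_loop]
  simp
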